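-- pv_equiv track=rewrite | github.com/igorlira/dirplayer-rs | vm-rust/tools/gen_js_opcodes.py | fmt_to_variant
-- ===== SOURCE A (Python) =====
-- def fmt_to_variant(fmt: str) -> str:
--     parts = [p.strip() for p in fmt.split("|")]
--     if any(p in ("JOF_JUMP", "JOF_JUMPX") for p in parts):
--         return "Jump"
--     if any(p in ("JOF_TABLESWITCH", "JOF_TABLESWITCHX") for p in parts):
--         return "Tableswitch"
--     if any(p in ("JOF_LOOKUPSWITCH", "JOF_LOOKUPSWITCHX") for p in parts):
--         return "Lookupswitch"
--     if "JOF_QARG" in parts: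
--         return "Qarg"
--     if "JOF_QVAR" in parts:
--         return "Qvar"
--     if "JOF_LOCAL" in parts:
--         return "Local"
--     if "JOF_OBJECT" in parts:
--         return "Object"
--     if "JOF_CONST" in parts:
--         return "Const"
--     if "JOF_UINT16" in parts:
--         return "Uint16"
--     return "Byte"
-- ===== SOURCE B (Python) =====
-- _RULES = {
--     "JOF_JUMP": (0, "Jump"),
--     "JOF_JUMPX": (0, "Jump"),
--     "JOF_TABLESWITCH": (1, "Tableswitch"),
--     "JOF_TABLESWITCHX": (1, "Tableswitch"),
--     "JOF_LOOKUPSWITCH": (2, "Lookupswitch"),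
--     "JOF_LOOKUPSWITCHX": (2, "Lookupswitch"),
--     "JOF_QARG": (3, "Qarg"),
--     "JOF_QVAR": (4, "Qvar"),
--     "JOF_LOCAL": (5, "Local"),
--     "JOF_OBJECT": (6, "Object"),
--     "JOF_CONST": (7, "Const"),
--     "JOF_UINT16": (8, "Uint16"),
-- }
--
--
-- def fmt_to_variant(fmt: str) -> str:
--     best = (9, "Byte")
--     for p in fmt.split("|"):
--         q = _RULES.get(p.strip())
--         if q is not None and q[0] < best[0]:
--             best = q
--     return best[1]
-- ===== Notes on version B (the rewrite author's own statement) =====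
-- stated objective: simpler
-- what changed: Replaces the ordered nine-branch if-cascade of membership tests with a flag->(priority,variant) table and a single min-priority pass over the split parts.
import Mathlib
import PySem

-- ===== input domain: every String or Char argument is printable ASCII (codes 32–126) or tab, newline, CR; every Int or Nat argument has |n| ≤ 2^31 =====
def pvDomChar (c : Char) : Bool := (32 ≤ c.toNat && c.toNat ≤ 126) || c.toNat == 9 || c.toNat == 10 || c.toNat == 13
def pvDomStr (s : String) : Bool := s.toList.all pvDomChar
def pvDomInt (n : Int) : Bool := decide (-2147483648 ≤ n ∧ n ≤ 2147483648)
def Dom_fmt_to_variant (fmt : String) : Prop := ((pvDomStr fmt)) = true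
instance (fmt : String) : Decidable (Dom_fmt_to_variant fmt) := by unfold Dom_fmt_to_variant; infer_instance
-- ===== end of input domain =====

-- B replaces A's ordered if-cascade of membership tests with a flag→(priority, variant)
-- table and one minimum-priority pass over the split parts (objective: simpler).

-- ===== PORT A =====
def fmt_to_variant (fmt : String) : String :=
  let parts := ((PySem.Str.split? fmt "|").getD []).map PySem.Str.strip
  if parts.any (fun p => p == "JOF_JUMP" || p == "JOF_JUMPX") then "Jump"
  else if parts.any (fun p => p == "JOF_TABLESWITCH" || p == "JOF_TABLESWITCHX") then "Tableswitch"
  else if parts.any (fun p => p == "JOF_LOOKUPSWITCH" || p == "JOF_LOOKUPSWITCHX") then "Lookupswitch"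
  else if parts.contains "JOF_QARG" then "Qarg"
  else if parts.contains "JOF_QVAR" then "Qvar"
  else if parts.contains "JOF_LOCAL" then "Local"
  else if parts.contains "JOF_OBJECT" then "Object"
  else if parts.contains "JOF_CONST" then "Const"
  else if parts.contains "JOF_UINT16" then "Uint16"
  else "Byte"

-- ===== PORT B =====
def pvRules : PySem.Dict String (Int × String) :=
  PySem.Dict.ofList
    [("JOF_JUMP", (0, "Jump")), ("JOF_JUMPX", (0, "Jump")),
     ("JOF_TABLESWITCH", (1, "Tableswitch")), ("JOF_TABLESWITCHX", (1, "Tableswitch")),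
     ("JOF_LOOKUPSWITCH", (2, "Lookupswitch")), ("JOF_LOOKUPSWITCHX", (2, "Lookupswitch")),
     ("JOF_QARG", (3, "Qarg")), ("JOF_QVAR", (4, "Qvar")), ("JOF_LOCAL", (5, "Local")),
     ("JOF_OBJECT", (6, "Object")), ("JOF_CONST", (7, "Const")), ("JOF_UINT16", (8, "Uint16"))]

def fmt_to_variant_alt (fmt : String) : String :=
  let best := ((PySem.Str.split? fmt "|").getD []).foldl
    (fun (best : Int × String) p =>
      match pvRules.get? (PySem.Str.strip p) with
      | some q => if q.1 < best.1 then q else best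
      | none => best)
    ((9 : Int), "Byte")
  best.2

-- ===== PRECONDITION & SPEC =====
def Spec_fmt_to_variant (fmt : String) (out : String) : Prop := out = fmt_to_variant_alt fmt
instance (fmt : String) (out : String) : Decidable (Spec_fmt_to_variant fmt out) := by unfold Spec_fmt_to_variant; infer_instance

-- ===== CLAIM (what is proved, stated in full; the proofs are below) =====
def Claim_equal_fmt_to_variant : Prop := ∀ (fmt : String), Dom_fmt_to_variant fmt → Spec_fmt_to_variant fmt (fmt_to_variant fmt)

-- ===== LEMMAS AND PROOFS =====

/-- priority of a part: first component of the table entry, 9 if absent. -/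
def pvPrio (p : String) : Int := ((pvRules.get? p).map Prod.fst).getD 9

/-- canonical variant name for a priority. -/
def pvName (k : Int) : String :=
  if k = 0 then "Jump" else if k = 1 then "Tableswitch" else if k = 2 then "Lookupswitch"
  else if k = 3 then "Qarg" else if k = 4 then "Qvar" else if k = 5 then "Local"
  else if k = 6 then "Object" else if k = 7 then "Const" else if k = 8 then "Uint16"
  else "Byte"

set_option maxHeartbeats 2000000 in
lemma pvRules_mk : pvRules = PySem.Dict.mk
    [("JOF_JUMP", (0, "Jump")), ("JOF_JUMPX", (0, "Jump")),
     ("JOF_TABLESWITCH", (1, "Tableswitch")), ("JOF_TABLESWITCHX", (1, "Tableswitch")),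
     ("JOF_LOOKUPSWITCH", (2, "Lookupswitch")), ("JOF_LOOKUPSWITCHX", (2, "Lookupswitch")),
     ("JOF_QARG", (3, "Qarg")), ("JOF_QVAR", (4, "Qvar")), ("JOF_LOCAL", (5, "Local")),
     ("JOF_OBJECT", (6, "Object")), ("JOF_CONST", (7, "Const")), ("JOF_UINT16", (8, "Uint16"))] := by
  decide

lemma pvGet?_chain (p : String) : pvRules.get? p =
    if "JOF_JUMP" = p then some ((0 : Int), "Jump") else if "JOF_JUMPX" = p then some (0, "Jump")
    else if "JOF_TABLESWITCH" = p then some (1, "Tableswitch") else if "JOF_TABLESWITCHX" = p then some (1, "Tableswitch")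
    else if "JOF_LOOKUPSWITCH" = p then some (2, "Lookupswitch") else if "JOF_LOOKUPSWITCHX" = p then some (2, "Lookupswitch")
    else if "JOF_QARG" = p then some (3, "Qarg") else if "JOF_QVAR" = p then some (4, "Qvar")
    else if "JOF_LOCAL" = p then some (5, "Local") else if "JOF_OBJECT" = p then some (6, "Object")
    else if "JOF_CONST" = p then some (7, "Const") else if "JOF_UINT16" = p then some (8, "Uint16") else none := by
  rw [pvRules_mk]
  simp only [PySem.Dict.get?_mk_cons, beq_iff_eq]
  rfl

lemma pvPrio_eq (p : String) : pvPrio p =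
    if "JOF_JUMP" = p then 0 else if "JOF_JUMPX" = p then 0
    else if "JOF_TABLESWITCH" = p then 1 else if "JOF_TABLESWITCHX" = p then 1
    else if "JOF_LOOKUPSWITCH" = p then 2 else if "JOF_LOOKUPSWITCHX" = p then 2
    else if "JOF_QARG" = p then 3 else if "JOF_QVAR" = p then 4
    else if "JOF_LOCAL" = p then 5 else if "JOF_OBJECT" = p then 6
    else if "JOF_CONST" = p then 7 else if "JOF_UINT16" = p then 8 else 9 := by
  simp only [pvPrio, pvGet?_chain, apply_ite (Option.map (Prod.fst : Int × String → Int)),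
    apply_ite (fun o : Option Int => o.getD 9), Option.map_some, Option.map_none,
    Option.getD_some, Option.getD_none]

set_option maxHeartbeats 2000000 in
lemma pvPrio_bounds (p : String) : 0 ≤ pvPrio p ∧ pvPrio p ≤ 9 := by
  rw [pvPrio_eq]; split_ifs <;> norm_num

set_option maxHeartbeats 2000000 in
lemma pvPrio_iff0 (p : String) : pvPrio p = 0 ↔ (p = "JOF_JUMP" ∨ p = "JOF_JUMPX") := by
  rw [pvPrio_eq]
  split_ifs with h1 h2 h3 h4 h5 h6 h7 h8 h9 h10 h11 h12
  · subst_vars; simp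
  · subst_vars; simp
  · subst_vars; simp
  · subst_vars; simp
  · subst_vars; simp
  · subst_vars; simp
  · subst_vars; simp
  · subst_vars; simp
  · subst_vars; simp
  · subst_vars; simp
  · subst_vars; simp
  · subst_vars; simp
  exact ⟨fun hh => absurd hh (by norm_num), fun hh => ((hh.elim (fun e => h1 e.symm) (fun e => h2 e.symm)) : False).elim⟩

set_option maxHeartbeats 2000000 in
lemma pvPrio_iff1 (p : String) : pvPrio p = 1 ↔ (p = "JOF_TABLESWITCH" ∨ p = "JOF_TABLESWITCHX") := by
  rw [pvPrio_eq]
  split_ifs with h1 h2 h3 h4 h5 h6 h7 h8 h9 h10 h11 h12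
  · subst_vars; simp
  · subst_vars; simp
  · subst_vars; simp
  · subst_vars; simp
  · subst_vars; simp
  · subst_vars; simp
  · subst_vars; simp
  · subst_vars; simp
  · subst_vars; simp
  · subst_vars; simp
  · subst_vars; simp
  · subst_vars; simp
  exact ⟨fun hh => absurd hh (by norm_num), fun hh => ((hh.elim (fun e => h3 e.symm) (fun e => h4 e.symm)) : False).elim⟩

set_option maxHeartbeats 2000000 in
lemma pvPrio_iff2 (p : String) : pvPrio p = 2 ↔ (p = "JOF_LOOKUPSWITCH" ∨ p = "JOF_LOOKUPSWITCHX") := by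
  rw [pvPrio_eq]
  split_ifs with h1 h2 h3 h4 h5 h6 h7 h8 h9 h10 h11 h12
  · subst_vars; simp
  · subst_vars; simp
  · subst_vars; simp
  · subst_vars; simp
  · subst_vars; simp
  · subst_vars; simp
  · subst_vars; simp
  · subst_vars; simp
  · subst_vars; simp
  · subst_vars; simp
  · subst_vars; simp
  · subst_vars; simp
  exact ⟨fun hh => absurd hh (by norm_num), fun hh => ((hh.elim (fun e => h5 e.symm) (fun e => h6 e.symm)) : False).elim⟩

set_option maxHeartbeats 2000000 in
lemma pvPrio_iff3 (p : String) : pvPrio p = 3 ↔ p = "JOF_QARG" := by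
  rw [pvPrio_eq]
  split_ifs with h1 h2 h3 h4 h5 h6 h7 h8 h9 h10 h11 h12
  · subst_vars; simp
  · subst_vars; simp
  · subst_vars; simp
  · subst_vars; simp
  · subst_vars; simp
  · subst_vars; simp
  · subst_vars; simp
  · subst_vars; simp
  · subst_vars; simp
  · subst_vars; simp
  · subst_vars; simp
  · subst_vars; simp
  exact ⟨fun hh => absurd hh (by norm_num), fun hh => (h7 hh.symm).elim⟩

set_option maxHeartbeats 2000000 in
lemma pvPrio_iff4 (p : String) : pvPrio p = 4 ↔ p = "JOF_QVAR" := by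
  rw [pvPrio_eq]
  split_ifs with h1 h2 h3 h4 h5 h6 h7 h8 h9 h10 h11 h12
  · subst_vars; simp
  · subst_vars; simp
  · subst_vars; simp
  · subst_vars; simp
  · subst_vars; simp
  · subst_vars; simp
  · subst_vars; simp
  · subst_vars; simp
  · subst_vars; simp
  · subst_vars; simp
  · subst_vars; simp
  · subst_vars; simp
  exact ⟨fun hh => absurd hh (by norm_num), fun hh => (h8 hh.symm).elim⟩

set_option maxHeartbeats 2000000 in
lemma pvPrio_iff5 (p : String) : pvPrio p = 5 ↔ p = "JOF_LOCAL" := by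
  rw [pvPrio_eq]
  split_ifs with h1 h2 h3 h4 h5 h6 h7 h8 h9 h10 h11 h12
  · subst_vars; simp
  · subst_vars; simp
  · subst_vars; simp
  · subst_vars; simp
  · subst_vars; simp
  · subst_vars; simp
  · subst_vars; simp
  · subst_vars; simp
  · subst_vars; simp
  · subst_vars; simp
  · subst_vars; simp
  · subst_vars; simp
  exact ⟨fun hh => absurd hh (by norm_num), fun hh => (h9 hh.symm).elim⟩

set_option maxHeartbeats 2000000 in
lemma pvPrio_iff6 (p : String) : pvPrio p = 6 ↔ p = "JOF_OBJECT" := by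
  rw [pvPrio_eq]
  split_ifs with h1 h2 h3 h4 h5 h6 h7 h8 h9 h10 h11 h12
  · subst_vars; simp
  · subst_vars; simp
  · subst_vars; simp
  · subst_vars; simp
  · subst_vars; simp
  · subst_vars; simp
  · subst_vars; simp
  · subst_vars; simp
  · subst_vars; simp
  · subst_vars; simp
  · subst_vars; simp
  · subst_vars; simp
  exact ⟨fun hh => absurd hh (by norm_num), fun hh => (h10 hh.symm).elim⟩

set_option maxHeartbeats 2000000 in
lemma pvPrio_iff7 (p : String) : pvPrio p = 7 ↔ p = "JOF_CONST" := by
  rw [pvPrio_eq]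
  split_ifs with h1 h2 h3 h4 h5 h6 h7 h8 h9 h10 h11 h12
  · subst_vars; simp
  · subst_vars; simp
  · subst_vars; simp
  · subst_vars; simp
  · subst_vars; simp
  · subst_vars; simp
  · subst_vars; simp
  · subst_vars; simp
  · subst_vars; simp
  · subst_vars; simp
  · subst_vars; simp
  · subst_vars; simp
  exact ⟨fun hh => absurd hh (by norm_num), fun hh => (h11 hh.symm).elim⟩

set_option maxHeartbeats 2000000 in
lemma pvPrio_iff8 (p : String) : pvPrio p = 8 ↔ p = "JOF_UINT16" := by
  rw [pvPrio_eq]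
  split_ifs with h1 h2 h3 h4 h5 h6 h7 h8 h9 h10 h11 h12
  · subst_vars; simp
  · subst_vars; simp
  · subst_vars; simp
  · subst_vars; simp
  · subst_vars; simp
  · subst_vars; simp
  · subst_vars; simp
  · subst_vars; simp
  · subst_vars; simp
  · subst_vars; simp
  · subst_vars; simp
  · subst_vars; simp
  exact ⟨fun hh => absurd hh (by norm_num), fun hh => (h12 hh.symm).elim⟩

def pvMpl (l : List String) (k : Int) : Int := l.foldl (fun m p => min m (pvPrio p)) k

/-- one step of B's loop, characterised by the part's priority. -/
lemma pvStep_eq (b1 : Int) (b2 : String) (p : String) (hb : b1 ≤ 9) :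
    (match pvRules.get? p with
      | some q => if q.1 < (b1, b2).1 then q else (b1, b2)
      | none => (b1, b2)) =
    if pvPrio p < b1 then (pvPrio p, pvName (pvPrio p)) else (b1, b2) := by
  rw [pvGet?_chain]
  by_cases e1 : "JOF_JUMP" = p
  · subst e1; simp [pvPrio_eq, pvName]
  rw [if_neg e1]
  by_cases e2 : "JOF_JUMPX" = p
  · subst e2; simp [pvPrio_eq, pvName]
  rw [if_neg e2]
  by_cases e3 : "JOF_TABLESWITCH" = p
  · subst e3; simp [pvPrio_eq, pvName]
  rw [if_neg e3]
  by_cases e4 : "JOF_TABLESWITCHX" = p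
  · subst e4; simp [pvPrio_eq, pvName]
  rw [if_neg e4]
  by_cases e5 : "JOF_LOOKUPSWITCH" = p
  · subst e5; simp [pvPrio_eq, pvName]
  rw [if_neg e5]
  by_cases e6 : "JOF_LOOKUPSWITCHX" = p
  · subst e6; simp [pvPrio_eq, pvName]
  rw [if_neg e6]
  by_cases e7 : "JOF_QARG" = p
  · subst e7; simp [pvPrio_eq, pvName]
  rw [if_neg e7]
  by_cases e8 : "JOF_QVAR" = p
  · subst e8; simp [pvPrio_eq, pvName]
  rw [if_neg e8]
  by_cases e9 : "JOF_LOCAL" = p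
  · subst e9; simp [pvPrio_eq, pvName]
  rw [if_neg e9]
  by_cases e10 : "JOF_OBJECT" = p
  · subst e10; simp [pvPrio_eq, pvName]
  rw [if_neg e10]
  by_cases e11 : "JOF_CONST" = p
  · subst e11; simp [pvPrio_eq, pvName]
  rw [if_neg e11]
  by_cases e12 : "JOF_UINT16" = p
  · subst e12; simp [pvPrio_eq, pvName]
  rw [if_neg e12]
  have h9 : pvPrio p = 9 := by
    rw [pvPrio_eq, if_neg e1, if_neg e2, if_neg e3, if_neg e4, if_neg e5, if_neg e6,
        if_neg e7, if_neg e8, if_neg e9, if_neg e10, if_neg e11, if_neg e12]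
  rw [if_neg (show ¬ pvPrio p < b1 by omega)]

lemma pvFold_canon (l : List String) (k : Int) (h0 : 0 ≤ k) (h9 : k ≤ 9) :
    l.foldl
      (fun (best : Int × String) p =>
        match pvRules.get? (PySem.Str.strip p) with
        | some q => if q.1 < best.1 then q else best
        | none => best)
      (k, pvName k)
    = (pvMpl (l.map PySem.Str.strip) k, pvName (pvMpl (l.map PySem.Str.strip) k)) := by
  induction l generalizing k with
  | nil => simp [pvMpl]
  | cons p l ih =>
    have hb := pvPrio_bounds (PySem.Str.strip p)
    have hcons : pvMpl ((p :: l).map PySem.Str.strip) k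
        = pvMpl (l.map PySem.Str.strip) (min k (pvPrio (PySem.Str.strip p))) := rfl
    rw [hcons, List.foldl_cons, pvStep_eq k (pvName k) (PySem.Str.strip p) h9]
    by_cases hlt : pvPrio (PySem.Str.strip p) < k
    · rw [if_pos hlt, show min k (pvPrio (PySem.Str.strip p)) = pvPrio (PySem.Str.strip p) by omega]
      exact ih _ hb.1 (by omega)
    · rw [if_neg hlt, show min k (pvPrio (PySem.Str.strip p)) = k by omega]
      exact ih k h0 h9

lemma pvMpl_le (l : List String) (k : Int) : pvMpl l k ≤ k ∧ ∀ p ∈ l, pvMpl l k ≤ pvPrio p := by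
  induction l generalizing k with
  | nil => simp [pvMpl]
  | cons p l ih =>
    have hcons : pvMpl (p :: l) k = pvMpl l (min k (pvPrio p)) := rfl
    have h1 := (ih (min k (pvPrio p))).1
    constructor
    · rw [hcons]; omega
    · intro q hq
      rcases List.mem_cons.mp hq with rfl | hq'
      · rw [hcons]; omega
      · rw [hcons]; exact (ih (min k (pvPrio p))).2 q hq'

lemma pvMpl_mem (l : List String) (k : Int) : pvMpl l k = k ∨ ∃ p ∈ l, pvPrio p = pvMpl l k := by
  induction l generalizing k with
  | nil => simp [pvMpl]
  | cons p l ih =>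
    have hcons : pvMpl (p :: l) k = pvMpl l (min k (pvPrio p)) := rfl
    rcases ih (min k (pvPrio p)) with h | ⟨q, hq, hpq⟩
    · by_cases h' : k ≤ pvPrio p
      · left; rw [hcons, h]; omega
      · right; exact ⟨p, List.mem_cons_self .., by rw [hcons, h]; omega⟩
    · right; exact ⟨q, List.mem_cons_of_mem _ hq, by rw [hcons]; exact hpq⟩

/-- A's cascade, evaluated at the minimal attained priority. -/
lemma pvCascade_eq (l : List String) (m : Int) (h0 : 0 ≤ m) (h9 : m ≤ 9)
    (hlow : ∀ p ∈ l, m ≤ pvPrio p) (hat : m ≠ 9 → ∃ p ∈ l, pvPrio p = m) :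
    (if l.any (fun p => p == "JOF_JUMP" || p == "JOF_JUMPX") then "Jump"
     else if l.any (fun p => p == "JOF_TABLESWITCH" || p == "JOF_TABLESWITCHX") then "Tableswitch"
     else if l.any (fun p => p == "JOF_LOOKUPSWITCH" || p == "JOF_LOOKUPSWITCHX") then "Lookupswitch"
     else if l.contains "JOF_QARG" then "Qarg"
     else if l.contains "JOF_QVAR" then "Qvar"
     else if l.contains "JOF_LOCAL" then "Local"
     else if l.contains "JOF_OBJECT" then "Object"
     else if l.contains "JOF_CONST" then "Const"
     else if l.contains "JOF_UINT16" then "Uint16"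
     else "Byte") = pvName m := by
  have c0 : (l.any (fun p => p == "JOF_JUMP" || p == "JOF_JUMPX") = true) ↔ ∃ p ∈ l, pvPrio p = 0 := by
    simp only [List.any_eq_true, Bool.or_eq_true, beq_iff_eq, pvPrio_iff0]
  have c1 : (l.any (fun p => p == "JOF_TABLESWITCH" || p == "JOF_TABLESWITCHX") = true) ↔ ∃ p ∈ l, pvPrio p = 1 := by
    simp only [List.any_eq_true, Bool.or_eq_true, beq_iff_eq, pvPrio_iff1]
  have c2 : (l.any (fun p => p == "JOF_LOOKUPSWITCH" || p == "JOF_LOOKUPSWITCHX") = true) ↔ ∃ p ∈ l, pvPrio p = 2 := by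
    simp only [List.any_eq_true, Bool.or_eq_true, beq_iff_eq, pvPrio_iff2]
  have c3 : (l.contains "JOF_QARG" = true) ↔ ∃ p ∈ l, pvPrio p = 3 := by
    simp only [List.contains_iff_mem]
    exact ⟨fun h => ⟨_, h, (pvPrio_iff3 "JOF_QARG").2 rfl⟩, fun ⟨p, hp, hq⟩ => (pvPrio_iff3 p).1 hq ▸ hp⟩
  have c4 : (l.contains "JOF_QVAR" = true) ↔ ∃ p ∈ l, pvPrio p = 4 := by
    simp only [List.contains_iff_mem]
    exact ⟨fun h => ⟨_, h, (pvPrio_iff4 "JOF_QVAR").2 rfl⟩, fun ⟨p, hp, hq⟩ => (pvPrio_iff4 p).1 hq ▸ hp⟩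
  have c5 : (l.contains "JOF_LOCAL" = true) ↔ ∃ p ∈ l, pvPrio p = 5 := by
    simp only [List.contains_iff_mem]
    exact ⟨fun h => ⟨_, h, (pvPrio_iff5 "JOF_LOCAL").2 rfl⟩, fun ⟨p, hp, hq⟩ => (pvPrio_iff5 p).1 hq ▸ hp⟩
  have c6 : (l.contains "JOF_OBJECT" = true) ↔ ∃ p ∈ l, pvPrio p = 6 := by
    simp only [List.contains_iff_mem]
    exact ⟨fun h => ⟨_, h, (pvPrio_iff6 "JOF_OBJECT").2 rfl⟩, fun ⟨p, hp, hq⟩ => (pvPrio_iff6 p).1 hq ▸ hp⟩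
  have c7 : (l.contains "JOF_CONST" = true) ↔ ∃ p ∈ l, pvPrio p = 7 := by
    simp only [List.contains_iff_mem]
    exact ⟨fun h => ⟨_, h, (pvPrio_iff7 "JOF_CONST").2 rfl⟩, fun ⟨p, hp, hq⟩ => (pvPrio_iff7 p).1 hq ▸ hp⟩
  have c8 : (l.contains "JOF_UINT16" = true) ↔ ∃ p ∈ l, pvPrio p = 8 := by
    simp only [List.contains_iff_mem]
    exact ⟨fun h => ⟨_, h, (pvPrio_iff8 "JOF_UINT16").2 rfl⟩, fun ⟨p, hp, hq⟩ => (pvPrio_iff8 p).1 hq ▸ hp⟩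
  have hF : ∀ j : Int, j < m → ¬ ∃ p ∈ l, pvPrio p = j := by
    rintro j hj ⟨p, hp, he⟩
    have := hlow p hp
    omega
  simp only [c0, c1, c2, c3, c4, c5, c6, c7, c8]
  interval_cases m
  · rw [if_pos (hat (by norm_num))]
    rfl
  · rw [if_neg (hF 0 (by norm_num))]
    rw [if_pos (hat (by norm_num))]
    rfl
  · rw [if_neg (hF 0 (by norm_num))]
    rw [if_neg (hF 1 (by norm_num))]
    rw [if_pos (hat (by norm_num))]
    rfl
  · rw [if_neg (hF 0 (by norm_num))]
    rw [if_neg (hF 1 (by norm_num))]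
    rw [if_neg (hF 2 (by norm_num))]
    rw [if_pos (hat (by norm_num))]
    rfl
  · rw [if_neg (hF 0 (by norm_num))]
    rw [if_neg (hF 1 (by norm_num))]
    rw [if_neg (hF 2 (by norm_num))]
    rw [if_neg (hF 3 (by norm_num))]
    rw [if_pos (hat (by norm_num))]
    rfl
  · rw [if_neg (hF 0 (by norm_num))]
    rw [if_neg (hF 1 (by norm_num))]
    rw [if_neg (hF 2 (by norm_num))]
    rw [if_neg (hF 3 (by norm_num))]
    rw [if_neg (hF 4 (by norm_num))]
    rw [if_pos (hat (by norm_num))]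
    rfl
  · rw [if_neg (hF 0 (by norm_num))]
    rw [if_neg (hF 1 (by norm_num))]
    rw [if_neg (hF 2 (by norm_num))]
    rw [if_neg (hF 3 (by norm_num))]
    rw [if_neg (hF 4 (by norm_num))]
    rw [if_neg (hF 5 (by norm_num))]
    rw [if_pos (hat (by norm_num))]
    rfl
  · rw [if_neg (hF 0 (by norm_num))]
    rw [if_neg (hF 1 (by norm_num))]
    rw [if_neg (hF 2 (by norm_num))]
    rw [if_neg (hF 3 (by norm_num))]
    rw [if_neg (hF 4 (by norm_num))]
    rw [if_neg (hF 5 (by norm_num))]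
    rw [if_neg (hF 6 (by norm_num))]
    rw [if_pos (hat (by norm_num))]
    rfl
  · rw [if_neg (hF 0 (by norm_num))]
    rw [if_neg (hF 1 (by norm_num))]
    rw [if_neg (hF 2 (by norm_num))]
    rw [if_neg (hF 3 (by norm_num))]
    rw [if_neg (hF 4 (by norm_num))]
    rw [if_neg (hF 5 (by norm_num))]
    rw [if_neg (hF 6 (by norm_num))]
    rw [if_neg (hF 7 (by norm_num))]
    rw [if_pos (hat (by norm_num))]
    rfl
  · rw [if_neg (hF 0 (by norm_num))]
    rw [if_neg (hF 1 (by norm_num))]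
    rw [if_neg (hF 2 (by norm_num))]
    rw [if_neg (hF 3 (by norm_num))]
    rw [if_neg (hF 4 (by norm_num))]
    rw [if_neg (hF 5 (by norm_num))]
    rw [if_neg (hF 6 (by norm_num))]
    rw [if_neg (hF 7 (by norm_num))]
    rw [if_neg (hF 8 (by norm_num))]
    rfl

-- ===== VERDICT (by name: the statement is the Claim_ definition above) =====
theorem fmt_to_variant_spec : Claim_equal_fmt_to_variant := by
  intro fmt _
  simp only [Spec_fmt_to_variant, fmt_to_variant, fmt_to_variant_alt]
  rw [show ((9 : Int), "Byte") = ((9 : Int), pvName 9) from rfl,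
      pvFold_canon ((PySem.Str.split? fmt "|").getD []) 9 (by norm_num) le_rfl]
  have hle := pvMpl_le (((PySem.Str.split? fmt "|").getD []).map PySem.Str.strip) 9
  have hmem := pvMpl_mem (((PySem.Str.split? fmt "|").getD []).map PySem.Str.strip) 9
  have h0 : 0 ≤ pvMpl (((PySem.Str.split? fmt "|").getD []).map PySem.Str.strip) 9 := by
    rcases hmem with h | ⟨p, _, hp⟩
    · omega
    · have := (pvPrio_bounds p).1; omega
  exact pvCascade_eq _ _ h0 hle.1 hle.2 (fun h => hmem.resolve_left h)
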